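-- pv_equiv track=rewrite | github.com/XiaoMi/nnlib | scripts/make_optab_hash.py | find_bestK
-- ===== SOURCE A (Python) =====
-- HASHN = int(512/2)
--
-- def hashStr( s, k ):
--     val = 0
--     for c in s:
--         val = val*k + ord(c)
--     return val % HASHN
--
-- def find_bestK(names):
--     bestK = -1
--     bestN = 0   # of empty bins - maximize
--     bestT = 1000000
--     bestL = len(names)+1    # biggest bucket - minimimize
--     # N = no. of non-empty buckets
--     # L = max bucket occupancy
--     # T = total # probes needed to lookup all
--     for k in range( 1, HASHN,2):
--         counts = [0]*HASHN
--         N,L,T = 0,0,0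
--         for nm in names:
--             h = hashStr(nm,k)
--             newcount = counts[h]+1
--             if newcount == 1:
--                 N += 1
--             T += newcount
--             counts[h] = newcount
--             L = max(L,newcount)
--             if L > bestL:
--                 break
--         if L < bestL or( L == bestL and T < bestT ):
--             bestK,bestN,bestL,bestT = k,N,L,T
--             if bestL == 1:
--                 break  # perfect...
--
--     return bestK,bestL,bestN,bestT
-- ===== SOURCE B (Python) =====
-- HASHN = int(512/2)
--
-- def hashStr(s, k):
--     val = 0
--     for c in s:
--         val = val*k + ord(c)
--     return val % HASHN
--
-- def find_bestK(names):
--     bestK, bestN, bestL, bestT = -1, 0, len(names) + 1, 1000000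
--     for k in range(1, HASHN, 2):
--         buckets = {}
--         for nm in names:
--             h = hashStr(nm, k)
--             buckets[h] = buckets.get(h, 0) + 1
--         counts = list(buckets.values())
--         N = len(counts)
--         L = max(counts, default=0)
--         T = sum(c * (c + 1) // 2 for c in counts)
--         if L < bestL or (L == bestL and T < bestT):
--             bestK, bestN, bestL, bestT = k, N, L, T
--             if bestL == 1:
--                 break
--     return bestK, bestL, bestN, bestT
-- ===== Notes on version B (the rewrite author's own statement) =====
-- stated objective: simpler
-- what changed: A's inner loop that threads a 256-slot counts array, running max, running probe total and an early break through every name is replaced by building a per-k bucket-frequency dict and reading N, L, T off the bucket counts in one summarizing pass, with T as the closed form sum of c*(c+1)//2.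
import Mathlib
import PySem

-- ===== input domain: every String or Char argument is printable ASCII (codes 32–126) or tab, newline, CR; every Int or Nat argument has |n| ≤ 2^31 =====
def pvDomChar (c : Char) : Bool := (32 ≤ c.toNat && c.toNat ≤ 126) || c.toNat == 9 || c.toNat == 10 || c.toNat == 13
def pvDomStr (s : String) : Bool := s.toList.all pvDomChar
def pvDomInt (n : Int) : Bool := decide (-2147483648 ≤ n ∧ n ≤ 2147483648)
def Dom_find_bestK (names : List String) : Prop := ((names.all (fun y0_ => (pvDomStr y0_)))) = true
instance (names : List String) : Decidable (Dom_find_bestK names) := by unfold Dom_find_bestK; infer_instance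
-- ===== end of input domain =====

-- B replaces A's incremental array-of-256-counters inner loop (with its early break) by a
-- per-k bucket frequency dict summarized in one pass with the closed form T = Σ c*(c+1)//2 (objective: simpler).

-- ===== PORT A =====
-- HASHN = int(512/2) = 256 (int of the exact float 256.0)
def HASHN_A : Int := 256

def hashStr_A (s : String) (k : Int) : Int :=
  PySem.Int.mod (s.toList.foldl (fun val c => val * k + (c.toNat : Int)) 0) HASHN_A

-- inner 'for nm in names' loop of A, with its 'if L > bestL: break'
def innerA (names : List String) (k bestL : Int) (counts : List Int) (N L T : Int) :
    Int × Int × Int :=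
  match names with
  | [] => (N, L, T)
  | nm :: rest =>
    let h := hashStr_A nm k
    let newcount := PySem.List.pyGetD counts h 0 + 1
    let N' := if newcount == 1 then N + 1 else N
    let T' := T + newcount
    let counts' := PySem.List.pySetD counts h newcount
    let L' := max L newcount
    if L' > bestL then (N', L', T') else innerA rest k bestL counts' N' L' T'

-- outer 'for k in range(1, HASHN, 2)' loop of A, with its 'if bestL == 1: break'
def outerA (ks : List Int) (names : List String) (bestK bestN bestL bestT : Int) :
    Int × Int × Int × Int :=
  match ks with
  | [] => (bestK, bestL, bestN, bestT)
  | k :: rest =>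
    let r := innerA names k bestL (PySem.List.pyRepeat [0] HASHN_A) 0 0 0
    if r.2.1 < bestL ∨ (r.2.1 = bestL ∧ r.2.2 < bestT) then
      if r.2.1 = 1 then (k, r.2.1, r.1, r.2.2)
      else outerA rest names k r.1 r.2.1 r.2.2
    else outerA rest names bestK bestN bestL bestT

def find_bestK (names : List String) : Int × Int × Int × Int :=
  outerA (PySem.List.pyRange 1 HASHN_A 2) names (-1) 0 ((names.length : Int) + 1) 1000000

-- ===== PORT B =====
def HASHN_B : Int := 256

def hashStr_B (s : String) (k : Int) : Int :=
  PySem.Int.mod (s.toList.foldl (fun val c => val * k + (c.toNat : Int)) 0) HASHN_B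

-- per-k body of B: bucket dict, then N, L, T read off the list of bucket counts
def statsB (names : List String) (k : Int) : Int × Int × Int :=
  let buckets := names.foldl (fun d nm =>
    let h := hashStr_B nm k
    d.insert h (d.getD h 0 + 1)) PySem.Dict.empty
  let counts := buckets.values
  ((counts.length : Int),
   PySem.List.maxD counts (fun c => c) 0,
   (counts.map (fun c => PySem.Int.floordiv (c * (c + 1)) 2)).sum)

-- one iteration of B's 'for k' loop (the Bool is the 'break' flag of the perfect exit)
def stepB (names : List String) (st : (Int × Int × Int × Int) × Bool) (k : Int) :
    (Int × Int × Int × Int) × Bool :=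
  if st.2 then st
  else
    let r := statsB names k
    if r.2.1 < st.1.2.2.1 ∨ (r.2.1 = st.1.2.2.1 ∧ r.2.2 < st.1.2.2.2) then
      ((k, r.1, r.2.1, r.2.2), r.2.1 == 1)
    else (st.1, false)

def find_bestK_alt (names : List String) : Int × Int × Int × Int :=
  let st := (PySem.List.pyRange 1 HASHN_B 2).foldl (stepB names)
      (((-1 : Int), (0 : Int), ((names.length : Int) + 1), (1000000 : Int)), false)
  (st.1.1, st.1.2.2.1, st.1.2.1, st.1.2.2.2)

-- ===== PRECONDITION & SPEC =====
def Spec_find_bestK (names : List String) (out : Int × Int × Int × Int) : Prop := out = find_bestK_alt names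
instance (names : List String) (out : Int × Int × Int × Int) : Decidable (Spec_find_bestK names out) := by unfold Spec_find_bestK; infer_instance

-- ===== CLAIM (what is proved, stated in full; the proofs are below) =====
def Claim_equal_find_bestK : Prop := ∀ (names : List String), Dom_find_bestK names → Spec_find_bestK names (find_bestK names)

-- ===== LEMMAS AND PROOFS =====

-- full (break-free) run of A's inner loop, used to relate A's early-exit loop to B's summary
def runFull (names : List String) (k : Int) (counts : List Int) (N L T : Int) :
    Int × Int × Int :=
  match names with
  | [] => (N, L, T)
  | nm :: rest =>
    let h := hashStr_A nm k
    let newcount := PySem.List.pyGetD counts h 0 + 1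
    runFull rest k (PySem.List.pySetD counts h newcount)
      (if newcount == 1 then N + 1 else N) (max L newcount) (T + newcount)

-- the three per-k summary statistics, as functions of the list of hashes
def specN (hs : List Int) : Int := ((PySem.Set.ofList hs).length : Int)
def specL (hs : List Int) : Int :=
  ((PySem.Set.ofList hs).map (fun x => (hs.count x : Int))).foldl max 0
def specT (hs : List Int) : Int :=
  ((PySem.Set.ofList hs).map (fun x =>
    PySem.Int.floordiv ((hs.count x : Int) * ((hs.count x : Int) + 1)) 2)).sum

lemma hash_bounds (s : String) (k : Int) : 0 ≤ hashStr_A s k ∧ hashStr_A s k < 256 :=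
  ⟨PySem.Int.mod_nonneg _ (by norm_num [HASHN_A]), PySem.Int.mod_lt _ (by norm_num [HASHN_A])⟩

lemma foldl_max_comm (l : List Int) (a b : Int) :
    l.foldl max (max a b) = max (l.foldl max a) b := by
  induction l generalizing a with
  | nil => rfl
  | cons x t ih =>
    simp only [List.foldl_cons]
    rw [show max (max a b) x = max (max a x) b by omega, ih]

lemma sum_one_change (l : List Int) (f g : Int → Int) (h : Int)
    (hmem : h ∈ l) (hnd : l.Nodup) (hagree : ∀ x ∈ l, x ≠ h → f x = g x) :
    (l.map g).sum = (l.map f).sum + (g h - f h) := by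
  induction l with
  | nil => simp at hmem
  | cons a t ih =>
    rcases List.nodup_cons.mp hnd with ⟨hna, hnt⟩
    rcases List.mem_cons.mp hmem with rfl | hmem
    · have : t.map g = t.map f := by
        apply List.map_congr_left
        intro x hx
        exact (hagree x (List.mem_cons_of_mem _ hx) (fun hxa => hna (hxa ▸ hx))).symm
      simp [this]; ring
    · have ha : f a = g a := hagree a (List.mem_cons_self) (fun hae => hna (hae ▸ hmem))
      have := ih hmem hnt (fun x hx => hagree x (List.mem_cons_of_mem _ hx))
      simp only [List.map_cons, List.sum_cons, this, ha]; ring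

lemma max_one_change (l : List Int) (f g : Int → Int) (h : Int)
    (hmem : h ∈ l) (hnd : l.Nodup) (hagree : ∀ x ∈ l, x ≠ h → f x = g x)
    (hle : f h ≤ g h) (a : Int) :
    (l.map g).foldl max a = max ((l.map f).foldl max a) (g h) := by
  induction l generalizing a with
  | nil => simp at hmem
  | cons x t ih =>
    rcases List.nodup_cons.mp hnd with ⟨hna, hnt⟩
    rcases List.mem_cons.mp hmem with rfl | hmem
    · have ht : t.map g = t.map f := by
        apply List.map_congr_left
        intro y hy
        exact (hagree y (List.mem_cons_of_mem _ hy) (fun hya => hna (hya ▸ hy))).symm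
      simp only [List.map_cons, List.foldl_cons, ht]
      have h1 : (max a (g h)) = max (max a (f h)) (g h) := by omega
      rw [h1, foldl_max_comm, foldl_max_comm]
    · have hx : f x = g x := hagree x (List.mem_cons_self) (fun hxe => hna (hxe ▸ hmem))
      simp only [List.map_cons, List.foldl_cons, ← hx]
      exact ih hmem hnt (fun y hy hyh => hagree y (List.mem_cons_of_mem _ hy) hyh) _

lemma floordiv_tri (c : Int) :
    PySem.Int.floordiv ((c + 1) * (c + 2)) 2 = PySem.Int.floordiv (c * (c + 1)) 2 + (c + 1) := by
  obtain ⟨m, hm⟩ : Even (c * (c + 1)) := Int.even_mul_succ_self c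
  have h1 : PySem.Int.floordiv (c * (c + 1)) 2 = m :=
    (PySem.Int.floordiv_eq_iff_of_pos (by norm_num)).mpr (by constructor <;> omega)
  have h2 : PySem.Int.floordiv ((c + 1) * (c + 2)) 2 = m + (c + 1) :=
    (PySem.Int.floordiv_eq_iff_of_pos (by norm_num)).mpr (by constructor <;> nlinarith)
  omega

lemma count_snoc_ne (hs : List Int) (h x : Int) (hx : x ≠ h) :
    (hs ++ [h]).count x = hs.count x := by
  simp [List.count_append, List.count_singleton]
  omega

lemma count_snoc_self (hs : List Int) (h : Int) :
    (hs ++ [h]).count h = hs.count h + 1 := by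
  simp [List.count_append]

lemma map_count_snoc (hs : List Int) (h : Int) (hmem : h ∉ hs) :
    (PySem.Set.ofList hs).map (fun x => ((hs ++ [h]).count x : Int))
      = (PySem.Set.ofList hs).map (fun x => (hs.count x : Int)) := by
  apply List.map_congr_left
  intro x hx
  have hxh : x ≠ h := fun he => hmem (he ▸ ((PySem.Set.mem_ofList _ _).mp hx))
  rw [count_snoc_ne hs h x hxh]

lemma specN_snoc (hs : List Int) (h : Int) :
    specN (hs ++ [h]) = if h ∈ hs then specN hs else specN hs + 1 := by
  unfold specN
  rw [PySem.Set.ofList_append_singleton, PySem.Set.add_eq_ite]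
  split_ifs with hm hm' hm'
  · rfl
  · exact absurd ((PySem.Set.mem_ofList _ _).mp hm) hm'
  · exact absurd ((PySem.Set.mem_ofList _ _).mpr hm') hm
  · simp

lemma specL_snoc (hs : List Int) (h : Int) :
    specL (hs ++ [h]) = max (specL hs) ((hs.count h : Int) + 1) := by
  unfold specL
  rw [PySem.Set.ofList_append_singleton, PySem.Set.add_eq_ite]
  by_cases hm : h ∈ hs
  · rw [if_pos ((PySem.Set.mem_ofList _ _).mpr hm)]
    rw [max_one_change (PySem.Set.ofList hs)
        (fun x => (hs.count x : Int)) (fun x => ((hs ++ [h]).count x : Int)) h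
        ((PySem.Set.mem_ofList _ _).mpr hm) (PySem.Set.nodup_ofList hs)
        (fun x _ hxh => by
          show ((hs.count x : Nat) : Int) = (((hs ++ [h]).count x : Nat) : Int)
          rw [count_snoc_ne hs h x hxh])
        (by
          show ((hs.count h : Nat) : Int) ≤ (((hs ++ [h]).count h : Nat) : Int)
          rw [count_snoc_self]; push_cast; omega) 0]
    show max (specL hs) (((hs ++ [h]).count h : Nat) : Int) = _
    rw [count_snoc_self]; push_cast; rfl
  · rw [if_neg (fun hc => hm ((PySem.Set.mem_ofList _ _).mp hc))]
    rw [List.map_append, List.foldl_append, map_count_snoc hs h hm]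
    simp [List.count_eq_zero_of_not_mem hm]

lemma specT_snoc (hs : List Int) (h : Int) :
    specT (hs ++ [h]) = specT hs + ((hs.count h : Int) + 1) := by
  unfold specT
  rw [PySem.Set.ofList_append_singleton, PySem.Set.add_eq_ite]
  by_cases hm : h ∈ hs
  · rw [if_pos ((PySem.Set.mem_ofList _ _).mpr hm)]
    rw [sum_one_change (PySem.Set.ofList hs)
        (fun x => PySem.Int.floordiv ((hs.count x : Int) * ((hs.count x : Int) + 1)) 2)
        (fun x => PySem.Int.floordiv (((hs ++ [h]).count x : Int) * (((hs ++ [h]).count x : Int) + 1)) 2)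
        h ((PySem.Set.mem_ofList _ _).mpr hm) (PySem.Set.nodup_ofList hs)
        (fun x _ hxh => by
          show PySem.Int.floordiv (((hs.count x : Nat) : Int) * (((hs.count x : Nat) : Int) + 1)) 2
              = PySem.Int.floordiv ((((hs ++ [h]).count x : Nat) : Int) * ((((hs ++ [h]).count x : Nat) : Int) + 1)) 2
          rw [count_snoc_ne hs h x hxh])]
    have : ((hs ++ [h]).count h : Int) = (hs.count h : Int) + 1 := by
      rw [count_snoc_self]; push_cast; ring
    rw [this]
    have htri := floordiv_tri ((hs.count h : Int))
    have harg : ((hs.count h : Int) + 1) * (((hs.count h : Int) + 1) + 1)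
        = ((hs.count h : Int) + 1) * ((hs.count h : Int) + 2) := by ring
    rw [harg, htri]
    ring
  · rw [if_neg (fun hc => hm ((PySem.Set.mem_ofList _ _).mp hc))]
    rw [List.map_append, List.sum_append]
    have hmap : (PySem.Set.ofList hs).map (fun x =>
          PySem.Int.floordiv (((hs ++ [h]).count x : Int) * (((hs ++ [h]).count x : Int) + 1)) 2)
        = (PySem.Set.ofList hs).map (fun x =>
          PySem.Int.floordiv ((hs.count x : Int) * ((hs.count x : Int) + 1)) 2) := by
      apply List.map_congr_left
      intro x hx
      have hxh : x ≠ h := fun he => hm (he ▸ ((PySem.Set.mem_ofList _ _).mp hx))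
      rw [count_snoc_ne hs h x hxh]
    rw [hmap]
    have h1 : ((hs ++ [h]).count h : Int) = 1 := by
      rw [count_snoc_self, List.count_eq_zero_of_not_mem hm]; rfl
    have h0 : (hs.count h : Int) = 0 := by
      simp [List.count_eq_zero_of_not_mem hm]
    simp only [List.map_cons, List.map_nil, List.sum_cons, List.sum_nil, h1, h0]
    norm_num

-- the invariant-carrying induction: a break-free run of A's inner loop from the state
-- described by hashes hs ends in the summary statistics of hs ++ (hashes of names)
lemma runFull_spec (names : List String) (k : Int) :
    ∀ (hs : List Int) (counts : List Int),
      counts.length = 256 →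
      (∀ j : Nat, j < 256 → counts.getD j 0 = (hs.count (j : Int) : Int)) →
      runFull names k counts (specN hs) (specL hs) (specT hs)
        = (specN (hs ++ names.map (fun nm => hashStr_A nm k)),
           specL (hs ++ names.map (fun nm => hashStr_A nm k)),
           specT (hs ++ names.map (fun nm => hashStr_A nm k))) := by
  induction names with
  | nil => intro hs counts _ _; simp [runFull]
  | cons nm rest ih =>
    intro hs counts hlen hcnt
    obtain ⟨h0, h1⟩ := hash_bounds nm k
    simp only [runFull]
    have htn : ((hashStr_A nm k).toNat : Int) = hashStr_A nm k := Int.toNat_of_nonneg h0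
    have htlt : (hashStr_A nm k).toNat < 256 := by omega
    have hget : PySem.List.pyGetD counts (hashStr_A nm k) 0
        = (hs.count (hashStr_A nm k) : Int) := by
      rw [PySem.List.pyGetD_eq_getElem counts 0 h0 (by rw [hlen]; exact_mod_cast h1)]
      have hj := hcnt (hashStr_A nm k).toNat htlt
      rw [htn] at hj
      rw [← hj]
      exact (List.getD_eq_getElem counts 0 (by omega)).symm
    rw [hget]
    have eN : (if ((hs.count (hashStr_A nm k) : Int) + 1) == 1
          then specN hs + 1 else specN hs)
        = specN (hs ++ [hashStr_A nm k]) := by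
      rw [specN_snoc]
      by_cases hm : hashStr_A nm k ∈ hs
      · have hc : 0 < hs.count (hashStr_A nm k) := List.count_pos_iff.mpr hm
        rw [if_pos hm, if_neg (by simp; omega)]
      · have hc : hs.count (hashStr_A nm k) = 0 := List.count_eq_zero_of_not_mem hm
        rw [if_neg hm, if_pos (by simp [hc])]
    rw [eN, ← specL_snoc hs (hashStr_A nm k), ← specT_snoc hs (hashStr_A nm k),
        PySem.List.pySetD_of_nonneg counts _ h0]
    have hstep := ih (hs ++ [hashStr_A nm k])
        (counts.set (hashStr_A nm k).toNat ((hs.count (hashStr_A nm k) : Int) + 1))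
        (by simp [hlen])
        (by
          intro j hj
          rw [List.getD_eq_getElem _ 0 (by simp [hlen]; omega)]
          rw [List.getElem_set]
          by_cases hji : (hashStr_A nm k).toNat = j
          · rw [if_pos hji]
            have : (j : Int) = hashStr_A nm k := by omega
            rw [this, count_snoc_self]
            push_cast; ring
          · rw [if_neg hji]
            have hne : (j : Int) ≠ hashStr_A nm k := by omega
            rw [count_snoc_ne hs _ _ hne, ← hcnt j hj]
            exact (List.getD_eq_getElem counts 0 (by omega)).symm)
    rw [hstep]
    have : (hs ++ [hashStr_A nm k]) ++ rest.map (fun nm => hashStr_A nm k)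
        = hs ++ (nm :: rest).map (fun nm => hashStr_A nm k) := by
      simp
    rw [this]

lemma runFull_L_mono (names : List String) (k : Int) :
    ∀ counts N L T, L ≤ (runFull names k counts N L T).2.1 := by
  induction names with
  | nil => intro counts N L T; simp [runFull]
  | cons nm rest ih =>
    intro counts N L T
    simp only [runFull]
    exact le_trans (le_max_left _ _) (ih _ _ _ _)

lemma innerA_le_runFull (names : List String) (k bL : Int) :
    ∀ counts N L T, (innerA names k bL counts N L T).2.1 ≤ (runFull names k counts N L T).2.1 := by
  induction names with
  | nil => intro counts N L T; simp [innerA, runFull]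
  | cons nm rest ih =>
    intro counts N L T
    simp only [innerA, runFull]
    split
    · exact runFull_L_mono rest k _ _ _ _
    · exact ih _ _ _ _

lemma innerA_eq_runFull (names : List String) (k bL : Int) :
    ∀ counts N L T, (innerA names k bL counts N L T).2.1 ≤ bL →
      innerA names k bL counts N L T = runFull names k counts N L T := by
  induction names with
  | nil => intro counts N L T _; rfl
  | cons nm rest ih =>
    intro counts N L T hle
    simp only [innerA] at hle ⊢
    simp only [runFull]
    split at hle
    · rename_i hb
      simp only [gt_iff_lt] at hb
      exact absurd hle (by simp; omega)
    · rename_i hb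
      rw [if_neg hb]
      exact ih _ _ _ _ hle

lemma runFull_full (names : List String) (k : Int) :
    runFull names k (PySem.List.pyRepeat [0] HASHN_A) 0 0 0
      = (specN (names.map (fun nm => hashStr_A nm k)),
         specL (names.map (fun nm => hashStr_A nm k)),
         specT (names.map (fun nm => hashStr_A nm k))) := by
  have hrep : PySem.List.pyRepeat [(0 : Int)] HASHN_A = List.replicate 256 (0 : Int) := by
    rw [PySem.List.pyRepeat_singleton]; rfl
  have := runFull_spec names k [] (PySem.List.pyRepeat [0] HASHN_A)
    (by rw [hrep, List.length_replicate])
    (by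
      intro j hj
      rw [hrep, List.getD_eq_getElem _ 0 (by rw [List.length_replicate]; omega),
          List.getElem_replicate]
      rfl)
  simpa [specN, specL, specT] using this

lemma maxD_id_nonneg (ms : List Int) (hnn : ∀ x ∈ ms, 0 ≤ x) :
    PySem.List.maxD ms (fun c => c) 0 = ms.foldl max 0 := by
  cases ms with
  | nil => rfl
  | cons x t =>
    unfold PySem.List.maxD
    rw [PySem.List.max?_id_cons]
    simp only [Option.getD_some, List.foldl_cons]
    have : max 0 x = x := max_eq_right (hnn x List.mem_cons_self)
    rw [this]

lemma statsB_spec (names : List String) (k : Int) :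
    statsB names k
      = (specN (names.map (fun nm => hashStr_A nm k)),
         specL (names.map (fun nm => hashStr_A nm k)),
         specT (names.map (fun nm => hashStr_A nm k))) := by
  simp only [statsB]
  have hfold : names.foldl (fun d nm =>
        d.insert (hashStr_B nm k) (d.getD (hashStr_B nm k) 0 + 1)) PySem.Dict.empty
      = PySem.Dict.counter (names.map (fun nm => hashStr_A nm k)) := by
    rw [← PySem.Dict.foldl_insert_getD_add_one_eq_counter, List.foldl_map]
    rfl
  rw [hfold]
  have hv : (PySem.Dict.counter (names.map (fun nm => hashStr_A nm k))).values
      = (PySem.Set.ofList (names.map (fun nm => hashStr_A nm k))).map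
          (fun x => ((names.map (fun nm => hashStr_A nm k)).count x : Int)) := by
    show ((PySem.Dict.counter (names.map (fun nm => hashStr_A nm k))).items).map (·.2) = _
    rw [PySem.Dict.items_counter, List.map_map]
    rfl
  rw [hv]
  refine congrArg₂ Prod.mk ?_ (congrArg₂ Prod.mk ?_ ?_)
  · simp [specN]
  · rw [maxD_id_nonneg _ (by
      intro x hx
      obtain ⟨y, _, rfl⟩ := List.mem_map.mp hx
      positivity)]
    rfl
  · rw [List.map_map]
    rfl

lemma foldl_stepB_done (names : List String) (ks : List Int) (x : Int × Int × Int × Int) :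
    ks.foldl (stepB names) (x, true) = (x, true) := by
  induction ks with
  | nil => rfl
  | cons k rest ih => simpa [stepB] using ih

lemma outer_bridge (names : List String) (ks : List Int) :
    ∀ bK bN bL bT,
      outerA ks names bK bN bL bT
        = (let st := ks.foldl (stepB names) ((bK, bN, bL, bT), false)
           (st.1.1, st.1.2.2.1, st.1.2.1, st.1.2.2.2)) := by
  induction ks with
  | nil => intro bK bN bL bT; rfl
  | cons k rest ih =>
    intro bK bN bL bT
    simp only [outerA, List.foldl_cons]
    have hstep : stepB names ((bK, bN, bL, bT), false) k
        = (if (statsB names k).2.1 < bL ∨ ((statsB names k).2.1 = bL ∧ (statsB names k).2.2 < bT)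
           then ((k, (statsB names k).1, (statsB names k).2.1, (statsB names k).2.2),
                 (statsB names k).2.1 == 1)
           else ((bK, bN, bL, bT), false)) := by
      simp only [stepB]
      rfl
    by_cases hle : (innerA names k bL (PySem.List.pyRepeat [0] HASHN_A) 0 0 0).2.1 ≤ bL
    · have hr : innerA names k bL (PySem.List.pyRepeat [0] HASHN_A) 0 0 0
          = (specN (names.map (fun nm => hashStr_A nm k)),
             specL (names.map (fun nm => hashStr_A nm k)),
             specT (names.map (fun nm => hashStr_A nm k))) := by
        rw [innerA_eq_runFull names k bL _ _ _ _ hle, runFull_full]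
      rw [hr, hstep, statsB_spec]
      by_cases hcond : specL (names.map (fun nm => hashStr_A nm k)) < bL ∨
          (specL (names.map (fun nm => hashStr_A nm k)) = bL ∧
           specT (names.map (fun nm => hashStr_A nm k)) < bT)
      · rw [if_pos hcond, if_pos hcond]
        by_cases hone : specL (names.map (fun nm => hashStr_A nm k)) = 1
        · rw [if_pos hone]
          have : (specL (names.map (fun nm => hashStr_A nm k)) == 1) = true := by
            simp [hone]
          rw [this, foldl_stepB_done]
        · rw [if_neg hone]
          have : (specL (names.map (fun nm => hashStr_A nm k)) == 1) = false := by
            simp [hone]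
          rw [this, ih]
      · rw [if_neg hcond, if_neg hcond, ih]
    · push Not at hle
      have hSL : bL < specL (names.map (fun nm => hashStr_A nm k)) := by
        have h1 := innerA_le_runFull names k bL (PySem.List.pyRepeat [0] HASHN_A) 0 0 0
        rw [runFull_full] at h1
        exact lt_of_lt_of_le hle h1
      rw [hstep, statsB_spec]
      have hcondA : ¬ ((innerA names k bL (PySem.List.pyRepeat [0] HASHN_A) 0 0 0).2.1 < bL ∨
          ((innerA names k bL (PySem.List.pyRepeat [0] HASHN_A) 0 0 0).2.1 = bL ∧
           (innerA names k bL (PySem.List.pyRepeat [0] HASHN_A) 0 0 0).2.2 < bT)) := by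
        rintro (h | ⟨h, _⟩) <;> omega
      have hcondB : ¬ ((specN (names.map (fun nm => hashStr_A nm k)),
             specL (names.map (fun nm => hashStr_A nm k)),
             specT (names.map (fun nm => hashStr_A nm k))).2.1 < bL ∨
          ((specN (names.map (fun nm => hashStr_A nm k)),
             specL (names.map (fun nm => hashStr_A nm k)),
             specT (names.map (fun nm => hashStr_A nm k))).2.1 = bL ∧
           (specN (names.map (fun nm => hashStr_A nm k)),
             specL (names.map (fun nm => hashStr_A nm k)),
             specT (names.map (fun nm => hashStr_A nm k))).2.2 < bT)) := by
        rintro (h | ⟨h, _⟩) <;> simp at h <;> omega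
      rw [if_neg hcondA, if_neg hcondB, ih]

-- ===== VERDICT (by name: the statement is the Claim_ definition above) =====
theorem find_bestK_spec : Claim_equal_find_bestK := by
  intro names _
  unfold Spec_find_bestK find_bestK find_bestK_alt
  rw [show HASHN_A = HASHN_B from rfl, outer_bridge]
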